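-- pv_equiv track=rewrite | github.com/MattMorris1996/PythonPoker | ScoreHand.py | score_pairs
-- ===== SOURCE A (Python) =====
-- def score_pairs(hand):
--     vals = sorted(list(map(lambda x: x[0], hand)), reverse=True)
--     checked = set()
--     score = 0
--     base = 3
--     for val in vals:
--         if vals.count(val) == 2 and val not in checked:
--             checked.add(val)
--             score += val * 13 * 4
--         if val not in checked:
--             score += val * 13 * base
--             base -= 1
--     return score
-- ===== SOURCE B (Python) =====
-- def score_pairs(hand):
--     counts = {}
--     for v, _ in hand:
--         counts[v] = counts.get(v, 0) + 1
--     score = 52 * sum(v for v, c in counts.items() if c == 2)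
--
--     def top(rest, base):
--         if not rest:
--             return 0
--         m = max(rest)
--         rest.remove(m)
--         return m * 13 * base + top(rest, base - 1)
--
--     return score + top([v for v, _ in hand if counts[v] != 2], 3)
-- ===== Notes on version B (the rewrite author's own statement) =====
-- stated objective: alternative
-- what changed: B never sorts and keeps no 'checked' set or running base: it builds a count dict once, sums the distinct pair values closed-form (52*v each), and scores the non-pair occurrences by a recursive selection (extract max, remove it, recurse with base-1) instead of A's descending-sorted scan with per-element vals.count.
import Mathlib
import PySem

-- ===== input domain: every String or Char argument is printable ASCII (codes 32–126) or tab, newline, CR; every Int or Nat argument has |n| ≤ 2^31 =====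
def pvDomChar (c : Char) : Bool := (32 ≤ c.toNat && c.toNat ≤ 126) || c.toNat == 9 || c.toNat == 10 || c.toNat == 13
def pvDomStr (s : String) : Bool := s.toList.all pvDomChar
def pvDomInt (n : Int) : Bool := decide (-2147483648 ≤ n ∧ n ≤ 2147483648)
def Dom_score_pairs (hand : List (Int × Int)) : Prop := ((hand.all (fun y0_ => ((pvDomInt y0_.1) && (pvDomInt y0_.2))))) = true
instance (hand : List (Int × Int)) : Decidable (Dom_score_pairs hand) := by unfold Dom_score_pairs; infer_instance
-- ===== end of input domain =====

-- B replaces A's sort + per-element vals.count scan + mutated 'checked' set by a count dict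
-- built once, a closed-form pair sum, and a recursive max-extraction over the non-pair values.

-- ===== PORT A =====
def score_pairs (hand : List (Int × Int)) : Int :=
  let vals := PySem.List.sorted (hand.map (fun x => x.1)) (fun x => x) true
  let st := vals.foldl (fun (st : PySem.Set Int × Int × Int) val =>
    let checked := st.1
    let score := st.2.1
    let base := st.2.2
    let p1 : PySem.Set Int × Int :=
      if PySem.List.count vals val == 2 && !(PySem.Set.contains checked val)
      then (PySem.Set.add checked val, score + val * 13 * 4)
      else (checked, score)
    if !(PySem.Set.contains p1.1 val)
    then (p1.1, p1.2 + val * 13 * base, base - 1)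
    else (p1.1, p1.2, base)) (PySem.Set.empty, 0, 3)
  st.2.1

-- ===== PORT B =====
-- used by topRec's termination proof (rest.remove shortens the list)
theorem pvRemoveLen {rest rest' : List Int} {m : Int}
    (h : PySem.List.remove? rest m = some rest') : rest'.length < rest.length := by
  by_cases hm : m ∈ rest
  · rw [PySem.List.remove?_eq_some_erase rest m hm] at h
    cases h
    have := List.length_erase_of_mem hm
    have : rest.length ≠ 0 := by
      intro h0; exact absurd hm (by simp [List.length_eq_zero_iff.1 h0])
    omega
  · rw [(PySem.List.remove?_eq_none_iff _ _).2 hm] at h; cases h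

-- B's inner recursion: extract the maximum, score it, recurse with base-1
def topRec (rest : List Int) (base : Int) : Int :=
  if rest.isEmpty then 0
  else
    match PySem.List.max? rest (fun x => x) with
    | none => 0      -- unreachable: rest nonempty
    | some m =>
      match h2 : PySem.List.remove? rest m with
      | none => 0    -- unreachable: m ∈ rest
      | some rest' => m * 13 * base + topRec rest' (base - 1)
termination_by rest.length
decreasing_by exact pvRemoveLen h2

def score_pairs_alt (hand : List (Int × Int)) : Int :=
  let counts := hand.foldl (fun (d : PySem.Dict Int Int) x => d.insert x.1 (d.getD x.1 0 + 1)) PySem.Dict.empty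
  let score : Int := 52 * (((counts.items.filter (fun p => p.2 == 2)).map (fun p => p.1)).sum)
  score + topRec ((hand.filter (fun x => !(counts.getD x.1 0 == 2))).map (fun x => x.1)) 3

-- ===== PRECONDITION & SPEC =====
def Spec_score_pairs (hand : List (Int × Int)) (out : Int) : Prop := out = score_pairs_alt hand
instance (hand : List (Int × Int)) (out : Int) : Decidable (Spec_score_pairs hand out) := by unfold Spec_score_pairs; infer_instance

-- ===== CLAIM (what is proved, stated in full; the proofs are below) =====
def Claim_equal_score_pairs : Prop := ∀ (hand : List (Int × Int)), Dom_score_pairs hand → Spec_score_pairs hand (score_pairs hand)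

-- ===== LEMMAS AND PROOFS =====

-- A's loop, abstracted over the "is a pair value" test q.
def loopA (q : Int → Bool) : List Int → (PySem.Set Int × Int × Int) → (PySem.Set Int × Int × Int)
  | [], st => st
  | v :: s, st =>
    let p1 : PySem.Set Int × Int :=
      if q v && !(PySem.Set.contains st.1 v)
      then (PySem.Set.add st.1 v, st.2.1 + v * 13 * 4)
      else (st.1, st.2.1)
    loopA q s (if !(PySem.Set.contains p1.1 v)
      then (p1.1, p1.2 + v * 13 * st.2.2, st.2.2 - 1)
      else (p1.1, p1.2, st.2.2))

-- the descending scan restricted to non-pair values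
def loopC : List Int → Int → Int
  | [], _ => 0
  | v :: s, base => v * 13 * base + loopC s (base - 1)

theorem loopA_eq_foldl (q : Int → Bool) (s : List Int) (st : PySem.Set Int × Int × Int) :
    loopA q s st = s.foldl (fun (st : PySem.Set Int × Int × Int) v =>
      let p1 : PySem.Set Int × Int :=
        if q v && !(PySem.Set.contains st.1 v)
        then (PySem.Set.add st.1 v, st.2.1 + v * 13 * 4)
        else (st.1, st.2.1)
      if !(PySem.Set.contains p1.1 v)
      then (p1.1, p1.2 + v * 13 * st.2.2, st.2.2 - 1)
      else (p1.1, p1.2, st.2.2)) st := by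
  induction s generalizing st with
  | nil => rfl
  | cons v s ih => simp [loopA, List.foldl_cons, ih]

-- the set of pair values accumulated by A
def pairsAfter (q : Int → Bool) (s : List Int) (checked : PySem.Set Int) : PySem.Set Int :=
  (s.filter q).foldl PySem.Set.add checked

-- Core invariant: as long as 'checked' only holds pair values, A's score equals the non-pair
-- descending scan plus 52 times the sum of the pair values newly collected.
theorem loopA_eq_loopC (q : Int → Bool) (s : List Int) :
    ∀ (checked : PySem.Set Int) (score base : Int),
    (∀ v, v ∈ checked → q v = true) →
    (loopA q s (checked, score, base)).2.1
      = score + loopC (s.filter (fun v => !(q v))) base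
          + 52 * ((pairsAfter q s checked).sum - checked.sum) := by
  induction s with
  | nil => intro checked score base _; simp [loopA, loopC, pairsAfter]
  | cons v s ih =>
    intro checked score base hinv
    cases hq : q v with
    | false =>
      have hcf : PySem.Set.contains checked v = false := by
        cases h : PySem.Set.contains checked v
        · rfl
        · exact absurd (hinv v ((PySem.Set.contains_iff _ _).1 h)) (by simp [hq])
      simp only [loopA, pairsAfter, List.filter_cons, hq, Bool.false_and, Bool.not_false,
        Bool.false_eq_true, ite_true, ite_false, hcf, loopC]
      rw [ih checked (score + v * 13 * base) (base - 1) hinv, pairsAfter]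
      ring
    | true =>
      by_cases hm : v ∈ checked
      · have hc : PySem.Set.contains checked v = true := (PySem.Set.contains_iff _ _).2 hm
        simp only [loopA, pairsAfter, List.filter_cons, hq, hc, Bool.not_true,
          Bool.and_false, Bool.false_eq_true, ite_true, ite_false,
          PySem.Set.add_of_mem hm, List.foldl_cons]
        exact ih checked score base hinv
      · have hcf : PySem.Set.contains checked v = false := by
          cases h : PySem.Set.contains checked v
          · rfl
          · exact absurd ((PySem.Set.contains_iff _ _).1 h) hm
        have hinv' : ∀ w, w ∈ PySem.Set.add checked v → q w = true := by
          intro w hw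
          rcases (PySem.Set.mem_add _ _ _).1 hw with h | h
          · exact hinv w h
          · simpa [h] using hq
        have hca : PySem.Set.contains (PySem.Set.add checked v) v = true :=
          (PySem.Set.contains_iff _ _).2 ((PySem.Set.mem_add _ _ _).2 (Or.inr rfl))
        simp only [loopA, pairsAfter, List.filter_cons, hq, hcf, Bool.true_and,
          Bool.not_false, Bool.not_true, Bool.false_eq_true, ite_true, ite_false, hca,
          List.foldl_cons]
        rw [ih (PySem.Set.add checked v) (score + v * 13 * 4) base hinv',
          PySem.Set.add_of_not_mem hm]
        simp only [List.sum_append, List.sum_cons, List.sum_nil, pairsAfter]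
        ring

-- two pairwise-(≥) permutations of the same list are equal
theorem desc_unique {l1 l2 : List Int} (p : l1.Perm l2)
    (h1 : l1.Pairwise (fun a b => b ≤ a)) (h2 : l2.Pairwise (fun a b => b ≤ a)) : l1 = l2 := by
  exact List.Perm.eq_of_pairwise (fun a b _ _ x y => le_antisymm y x) h1 h2 p

-- B's max-extraction recursion IS the descending scan
theorem topRec_eq_loopC (xs : List Int) (base : Int) :
    topRec xs base = loopC (PySem.List.sorted xs (fun x => x) true) base := by
  induction hn : xs.length using Nat.strong_induction_on generalizing xs base with
  | _ n ih =>
    cases hxs : xs with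
    | nil => subst hxs; rw [topRec]; rfl
    | cons a t =>
      subst hxs
      obtain ⟨m, hm⟩ : ∃ m, PySem.List.max? (a :: t) (fun x => x) = some m := by
        cases h : PySem.List.max? (a :: t) (fun x => x) with
        | none => exact absurd ((PySem.List.max?_eq_none_iff _ _).1 h) (by simp)
        | some m => exact ⟨m, rfl⟩
      have hmem : m ∈ a :: t := PySem.List.max?_mem hm
      have hrem : PySem.List.remove? (a :: t) m = some ((a :: t).erase m) :=
        PySem.List.remove?_eq_some_erase (a :: t) m hmem
      obtain ⟨h0, ts, hs⟩ : ∃ h0 ts, PySem.List.sorted (a :: t) (fun x => x) true = h0 :: ts := by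
        cases h : PySem.List.sorted (a :: t) (fun x => x) true with
        | nil => exact absurd ((PySem.List.sorted_eq_nil_iff _ _ _).1 h) (by simp)
        | cons h0 ts => exact ⟨h0, ts, rfl⟩
      have hperm : (h0 :: ts).Perm (a :: t) := hs ▸ PySem.List.sorted_perm _ _ _
      -- the head of the descending sort is the maximum value m
      have hh0 : h0 = m := by
        have h1 : h0 ≤ m := PySem.List.max?_isMax hm h0 (hperm.mem_iff.1 (by simp))
        have h2 : m ≤ h0 := PySem.List.key_head_sorted_rev_ge (a :: t) (fun x => x) hs m hmem
        omega
      -- the tail of the descending sort is the descending sort of the erased list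
      have hts : ts.Perm ((a :: t).erase m) := by
        have h := List.Perm.erase m (hh0 ▸ hperm)
        simpa using h
      have htail : PySem.List.sorted ((a :: t).erase m) (fun x => x) true = ts := by
        apply desc_unique
        · exact (PySem.List.sorted_perm _ _ _).trans hts.symm
        · exact PySem.List.sorted_pairwise_rev _ _
        · have h := PySem.List.sorted_pairwise_rev (a :: t) (fun x => x)
          rw [hs] at h
          exact h.of_cons
      have hlt : ((a :: t).erase m).length < n := by
        rw [List.length_erase_of_mem hmem]
        simp only [List.length_cons] at hn ⊢
        omega
      rw [topRec]
      simp only [List.isEmpty_cons, Bool.false_eq_true, ite_false, hm]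
      split
      · next h2 => rw [hrem] at h2; cases h2
      · next rest' h2 =>
          rw [hrem] at h2
          cases h2
          rw [ih _ hlt _ (base - 1) rfl, htail, hs, hh0, loopC]

theorem loopA_start (q : Int → Bool) (s : List Int) :
    (loopA q s (PySem.Set.empty, 0, 3)).2.1
      = loopC (s.filter (fun v => !(q v))) 3 + 52 * (pairsAfter q s PySem.Set.empty).sum := by
  rw [loopA_eq_loopC q s PySem.Set.empty 0 3 (by intro v hv; simp [PySem.Set.empty] at hv)]
  simp [PySem.Set.empty]

-- filtering commutes with the descending sort
theorem filter_sorted (xs : List Int) (p : Int → Bool) :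
    (PySem.List.sorted xs (fun x => x) true).filter p
      = PySem.List.sorted (xs.filter p) (fun x => x) true := by
  apply desc_unique
  · exact ((PySem.List.sorted_perm xs (fun x => x) true).filter p).trans
      (PySem.List.sorted_perm _ _ _).symm
  · exact (PySem.List.sorted_pairwise_rev _ _).filter p
  · exact PySem.List.sorted_pairwise_rev _ _

-- the counting loop of B is Counter(first components)
theorem counts_eq_counter (hand : List (Int × Int)) :
    hand.foldl (fun (d : PySem.Dict Int Int) x => d.insert x.1 (d.getD x.1 0 + 1)) PySem.Dict.empty
      = PySem.Dict.counter (hand.map (fun x => x.1)) := by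
  rw [← PySem.Dict.foldl_insert_getD_add_one_eq_counter, List.foldl_map]

-- A's pair test (count in the sorted list) equals B's (Counter lookup)
theorem q_eq (hand : List (Int × Int)) :
    (fun v => PySem.List.count (PySem.List.sorted (hand.map (fun x => x.1)) (fun x => x) true) v == 2)
      = (fun v => (PySem.Dict.counter (hand.map (fun x => x.1))).getD v 0 == 2) := by
  funext v
  rw [PySem.Dict.getD_counter, PySem.List.count_eq,
    (PySem.List.sorted_perm (hand.map (fun x => x.1)) (fun x => x) true).count_eq]
  by_cases h : (hand.map (fun x => x.1)).count v = 2 <;> simp [h]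
  omega

-- A's collected pair values sum to B's sum over the counter's count-2 items
theorem pair_sum_eq (hand : List (Int × Int)) :
    (pairsAfter (fun v => (PySem.Dict.counter (hand.map (fun x => x.1))).getD v 0 == 2)
        (PySem.List.sorted (hand.map (fun x => x.1)) (fun x => x) true) PySem.Set.empty).sum
      = ((((PySem.Dict.counter (hand.map (fun x => x.1))).items.filter
          (fun p => p.2 == 2)).map (fun p => p.1)).sum) := by
  have h1 : pairsAfter (fun v => (PySem.Dict.counter (hand.map (fun x => x.1))).getD v 0 == 2)
        (PySem.List.sorted (hand.map (fun x => x.1)) (fun x => x) true) PySem.Set.empty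
      = PySem.Set.ofList ((PySem.List.sorted (hand.map (fun x => x.1)) (fun x => x) true).filter
          (fun v => (PySem.Dict.counter (hand.map (fun x => x.1))).getD v 0 == 2)) := by
    rw [pairsAfter, PySem.Set.ofList_eq_foldl]; rfl
  rw [h1, PySem.Dict.items_counter, List.filter_map, List.map_map]
  simp only [Function.comp_def, List.map_id']
  refine List.Perm.sum_eq ((List.perm_ext_iff_of_nodup (PySem.Set.nodup_ofList _)
    (List.Nodup.filter _ (PySem.Set.nodup_ofList _))).2 ?_)
  intro a
  simp only [PySem.Set.mem_ofList, List.mem_filter, PySem.List.mem_sorted,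
    PySem.Dict.getD_counter]

-- B's comprehension [v for v,_ in hand if counts[v]!=2] is the filter of the value list
theorem b_list_eq (hand : List (Int × Int)) (d : PySem.Dict Int Int) :
    (hand.filter (fun x => !(d.getD x.1 0 == 2))).map (fun x => x.1)
      = (hand.map (fun x => x.1)).filter (fun v => !(d.getD v 0 == 2)) := by
  induction hand with
  | nil => rfl
  | cons a t ih => by_cases h : d.getD a.1 0 = 2 <;> simp [h, ih]

-- ===== VERDICT (by name: the statement is the Claim_ definition above) =====
theorem score_pairs_spec : Claim_equal_score_pairs := by
  intro hand _
  show score_pairs hand = score_pairs_alt hand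
  have hA : score_pairs hand
      = (loopA (fun v => PySem.List.count (PySem.List.sorted (hand.map (fun x => x.1)) (fun x => x) true) v == 2)
          (PySem.List.sorted (hand.map (fun x => x.1)) (fun x => x) true)
          (PySem.Set.empty, 0, 3)).2.1 := by
    rw [loopA_eq_foldl]; rfl
  have hB : score_pairs_alt hand
      = 52 * ((((hand.foldl (fun (d : PySem.Dict Int Int) x => d.insert x.1 (d.getD x.1 0 + 1)) PySem.Dict.empty).items.filter
          (fun p => p.2 == 2)).map (fun p => p.1)).sum)
        + topRec ((hand.filter (fun x => !((hand.foldl (fun (d : PySem.Dict Int Int) x => d.insert x.1 (d.getD x.1 0 + 1)) PySem.Dict.empty).getD x.1 0 == 2))).map (fun x => x.1)) 3 := rfl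
  have hqf : (fun v => !(PySem.List.count (PySem.List.sorted (hand.map (fun x => x.1)) (fun x => x) true) v == 2))
      = (fun v => !((PySem.Dict.counter (hand.map (fun x => x.1))).getD v 0 == 2)) := by
    funext v
    rw [congrFun (q_eq hand) v]
  rw [hA, hB, loopA_start, q_eq, hqf, pair_sum_eq, filter_sorted, ← topRec_eq_loopC,
    counts_eq_counter, b_list_eq]
  exact add_comm (topRec ((hand.map (fun x => x.1)).filter (fun v => !((PySem.Dict.counter (hand.map (fun x => x.1))).getD v 0 == 2))) 3) _
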